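-- pv_equiv track=rewrite | github.com/DennisPruene/AdventOfCode2023 | Day12/day12.py | is_state_possible
-- ===== SOURCE A (Python) =====
-- def is_state_possible(state, redundancy):
--     redundancy_index = 0
--     current_group_count = 0
--     for tool in state:
--         if tool == '#':
--             current_group_count += 1
--         elif current_group_count:
--             if redundancy_index >= len(redundancy) or redundancy[redundancy_index] != current_group_count:
--                 return False
--             redundancy_index += 1
--             current_group_count = 0
--     if current_group_count > 0 and redundancy_index < len(redundancy):
--         return current_group_count == redundancy[redundancy_index]
--     return True
-- ===== SOURCE B (Python) =====
-- def is_state_possible(state, redundancy):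
--     # extract the maximal '#'-run lengths, then validate them against redundancy
--     runs = []
--     i, n = 0, len(state)
--     while i < n:
--         if state[i] == '#':
--             j = i
--             while j < n and state[j] == '#':
--                 j += 1
--             runs.append(j - i)
--             i = j
--         else:
--             i += 1
--     if runs and state.endswith('#'):
--         completed, trailing = runs[:-1], runs[-1]
--     else:
--         completed, trailing = runs, None
--     if completed != redundancy[:len(completed)]:
--         return False
--     if trailing is not None and len(completed) < len(redundancy):
--         return trailing == redundancy[len(completed)]
--     return True
-- ===== Notes on version B (the rewrite author's own statement) =====
-- stated objective: alternative
-- what changed: Instead of A's single pass that interleaves counting '#'s with validating against redundancy, B first extracts the list of maximal '#'-run lengths with a two-pointer scan, splits off the trailing run when the state ends with '#', and then validates the completed runs by one slice comparison against a prefix of redundancy.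
import Mathlib
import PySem

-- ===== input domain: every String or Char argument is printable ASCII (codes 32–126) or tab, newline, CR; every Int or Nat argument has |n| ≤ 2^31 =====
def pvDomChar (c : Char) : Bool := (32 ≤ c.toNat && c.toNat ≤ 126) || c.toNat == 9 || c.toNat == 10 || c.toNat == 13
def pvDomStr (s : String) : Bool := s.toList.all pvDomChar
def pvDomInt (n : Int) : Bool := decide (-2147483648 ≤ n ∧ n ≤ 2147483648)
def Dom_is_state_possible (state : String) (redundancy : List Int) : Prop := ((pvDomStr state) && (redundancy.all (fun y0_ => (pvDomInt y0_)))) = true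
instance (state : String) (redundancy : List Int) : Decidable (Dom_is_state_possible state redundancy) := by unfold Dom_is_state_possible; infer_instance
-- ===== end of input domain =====

-- B re-implements the check by first extracting the maximal '#'-run lengths and then
-- validating them against `redundancy` (a different decomposition; objective: alternative).

-- ===== PORT A =====
-- the for-loop of A: state chars, redundancy_index, current_group_count
def pvLoopA (red : List Int) : List Char → Nat → Int → Bool
  | [], ri, cnt =>
      if 0 < cnt ∧ ri < red.length then decide (cnt = red.getD ri 0) else true
  | c :: rest, ri, cnt =>
      if c = '#' then pvLoopA red rest ri (cnt + 1)
      else if cnt ≠ 0 then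
        if red.length ≤ ri ∨ red.getD ri 0 ≠ cnt then false
        else pvLoopA red rest (ri + 1) 0
      else pvLoopA red rest ri cnt

def is_state_possible (state : String) (redundancy : List Int) : Bool :=
  pvLoopA redundancy state.toList 0 0

-- ===== PORT B =====
-- Source B's run extraction: the outer while-loop scans; the inner while-loop that advances j
-- over the contiguous '#'s is the takeWhile/dropWhile of the remainder (exact).
def pvHashRuns : List Char → List Int
  | [] => []
  | c :: rest =>
      if c = '#' then
        (((rest.takeWhile (· == '#')).length : Int) + 1) :: pvHashRuns (rest.dropWhile (· == '#'))
      else pvHashRuns rest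
  termination_by cs => cs.length
  decreasing_by
  · simpa using Nat.lt_succ_of_le (rest.length_dropWhile_le (· == '#'))
  · simp

-- the two final return statements of Source B: validate (completed, trailing) against redundancy
def pvValidate (red : List Int) (ct : List Int × Option Int) : Bool :=
  -- completed != redundancy[:len(completed)]
  if ct.1 ≠ red.take ct.1.length then false
  else
    match ct.2 with
    | some t => if ct.1.length < red.length then decide (t = red.getD ct.1.length 0) else true
    | none => true

def is_state_possible_alt (state : String) (redundancy : List Int) : Bool :=
  let runs := pvHashRuns state.toList
  -- runs[:-1], runs[-1] under the guard runs ≠ [] (exact for Python's runs[:-1]/runs[-1])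
  let ct : List Int × Option Int :=
    if runs ≠ [] ∧ PySem.Str.endswith state "#" = true then (runs.dropLast, some (runs.getLastD 0))
    else (runs, none)
  pvValidate redundancy ct

-- ===== PRECONDITION & SPEC =====
def Spec_is_state_possible (state : String) (redundancy : List Int) (out : Bool) : Prop := out = is_state_possible_alt state redundancy
instance (state : String) (redundancy : List Int) (out : Bool) : Decidable (Spec_is_state_possible state redundancy out) := by unfold Spec_is_state_possible; infer_instance

-- ===== CLAIM (what is proved, stated in full; the proofs are below) =====
def Claim_equal_is_state_possible : Prop := ∀ (state : String) (redundancy : List Int), Dom_is_state_possible state redundancy → Spec_is_state_possible state redundancy (is_state_possible state redundancy)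

-- ===== LEMMAS AND PROOFS =====

-- completed runs / optional trailing run of the string `'#'^cnt ++ cs` (proof-side characterization)
def pvRunsFrom : Int → List Char → List Int × Option Int
  | cnt, [] => ([], if 0 < cnt then some cnt else none)
  | cnt, c :: rest =>
      if c = '#' then pvRunsFrom (cnt + 1) rest
      else if cnt ≠ 0 then ((cnt :: (pvRunsFrom 0 rest).1), (pvRunsFrom 0 rest).2)
      else pvRunsFrom 0 rest

-- validation of (completed runs, trailing run) against the remaining redundancy list
def pvChk : List Int → List Int × Option Int → Bool
  | _, ([], none) => true
  | red, ([], some t) => match red with | [] => true | r :: _ => decide (t = r)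
  | red, (g :: gs, tr) => match red with
      | [] => false
      | r :: red' => if r ≠ g then false else pvChk red' (gs, tr)

def pvLastHash (cs : List Char) : Bool := cs.getLast? == some '#'

def pvSplit (runs : List Int) (b : Bool) : List Int × Option Int :=
  if runs ≠ [] ∧ b = true then (runs.dropLast, some (runs.getLastD 0)) else (runs, none)

theorem pvLoopA_eq_chk (cs : List Char) : ∀ (red : List Int) (ri : Nat) (cnt : Int),
    pvLoopA red cs ri cnt = pvChk (red.drop ri) (pvRunsFrom cnt cs) := by
  induction cs with
  | nil =>
      intro red ri cnt
      by_cases h : 0 < cnt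
      · by_cases hr : ri < red.length
        · have hd : red.drop ri ≠ [] := by simp [List.drop_eq_nil_iff]; omega
          obtain ⟨r, d', hrd⟩ := List.exists_cons_of_ne_nil hd
          have hr' : red[ri]? = some r := by rw [← List.head?_drop, hrd]; rfl
          have hge : red[ri] = r := by
            rw [List.getElem?_eq_getElem hr] at hr'
            exact Option.some.inj hr'
          simp [pvLoopA, pvRunsFrom, h, hr, hrd, pvChk, List.getD, hge]
        · have hd : red.drop ri = [] := by simp [List.drop_eq_nil_iff]; omega
          simp [pvLoopA, pvRunsFrom, h, hr, hd, pvChk]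
      · simp [pvLoopA, pvRunsFrom, h, pvChk]
  | cons c rest ih =>
      intro red ri cnt
      by_cases hc : c = '#'
      · simp [pvLoopA, pvRunsFrom, hc, ih]
      · by_cases hz : cnt = 0
        · simp [pvLoopA, pvRunsFrom, hc, hz, ih]
        · by_cases hr : red.length ≤ ri
          · have hd : red.drop ri = [] := by simp [List.drop_eq_nil_iff]; omega
            simp [pvLoopA, pvRunsFrom, hc, hz, hr, hd, pvChk]
          · have hd : red.drop ri ≠ [] := by simp [List.drop_eq_nil_iff]; omega
            obtain ⟨r, d', hrd⟩ := List.exists_cons_of_ne_nil hd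
            have hr' : red[ri]? = some r := by rw [← List.head?_drop, hrd]; rfl
            have hge : red[ri] = r := by
              rw [List.getElem?_eq_getElem (by omega)] at hr'
              exact Option.some.inj hr'
            have hd' : red.drop (ri + 1) = d' := by
              rw [← List.tail_drop, hrd]; rfl
            by_cases hrc : r = cnt
            · simp [pvLoopA, pvRunsFrom, hc, hz, hr, hrd, pvChk, List.getD, hr', hrc, ih, hd']
            · simp [pvLoopA, pvRunsFrom, hc, hz, hr, hrd, pvChk, List.getD, hr', hrc]

theorem pvFinal_eq_chk (completed : List Int) : ∀ (red : List Int) (tr : Option Int),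
    pvValidate red (completed, tr) = pvChk red (completed, tr) := by
  unfold pvValidate
  induction completed with
  | nil =>
      intro red tr
      cases tr with
      | none => simp [pvChk]
      | some t =>
          cases red with
          | nil => simp [pvChk]
          | cons r red' => simp [pvChk, List.getD]
  | cons g gs ih =>
      intro red tr
      cases red with
      | nil => simp [pvChk]
      | cons r red' =>
          by_cases hg : r = g
          · have := ih red' tr
            simp only [pvChk, hg, if_neg, ne_eq, not_true_eq_false, not_false_eq_true]
            simpa [List.take, List.getD] using this
          · simp [pvChk, hg, Ne.symm hg]

theorem pvTakeWhile_hash (l : List Char) :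
    l.takeWhile (· == '#') = List.replicate (l.takeWhile (· == '#')).length '#' := by
  apply List.eq_replicate_of_mem
  intro x hx
  have := List.mem_takeWhile_imp hx
  simpa using this

theorem pvRunsFrom_replicate (m : Nat) : ∀ (cnt : Int) (cs : List Char),
    pvRunsFrom cnt (List.replicate m '#' ++ cs) = pvRunsFrom (cnt + m) cs := by
  induction m with
  | zero => intro cnt cs; simp
  | succ k ih =>
      intro cnt cs
      rw [List.replicate_succ, List.cons_append]
      rw [show ∀ l, pvRunsFrom cnt ('#' :: l) = pvRunsFrom (cnt + 1) l from fun l => by simp [pvRunsFrom]]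
      rw [ih]
      have hcast : cnt + 1 + (k : Int) = cnt + ((k + 1 : Nat) : Int) := by push_cast; ring
      rw [hcast]

theorem pvGetLast?_cons {c : Char} {l : List Char} (h : l ≠ []) :
    (c :: l).getLast? = l.getLast? := by
  cases l with
  | nil => exact absurd rfl h
  | cons a t => exact List.getLast?_cons_cons ..

theorem pvGetLast?_append {l m : List Char} (h : m ≠ []) :
    (l ++ m).getLast? = m.getLast? := List.getLast?_append_of_ne_nil l h

theorem pvHashRuns_ne_nil (cs : List Char) (h : pvLastHash cs = true) : pvHashRuns cs ≠ [] := by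
  induction cs with
  | nil => simp [pvLastHash] at h
  | cons c rest ih =>
      by_cases hc : c = '#'
      · simp [pvHashRuns, hc]
      · have hrest : rest ≠ [] := by
          rintro rfl
          simp [pvLastHash, hc] at h
        have h' : pvLastHash rest = true := by
          unfold pvLastHash at h ⊢
          rwa [pvGetLast?_cons hrest] at h
        simpa [pvHashRuns, hc] using ih h'

theorem pvRunsFrom_eq_split : (cs : List Char) →
    pvRunsFrom 0 cs = pvSplit (pvHashRuns cs) (pvLastHash cs)
  | [] => by simp [pvRunsFrom, pvHashRuns, pvLastHash, pvSplit]
  | c :: rest => by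
      by_cases hc : c = '#'
      · subst hc
        have hsplit : rest = List.replicate (rest.takeWhile (· == '#')).length '#' ++ rest.dropWhile (· == '#') := by
          conv_lhs => rw [← List.takeWhile_append_dropWhile (p := (· == '#')) (l := rest)]
          rw [← pvTakeWhile_hash]
        have hrec : pvRunsFrom 0 ('#' :: rest)
            = pvRunsFrom (1 + ((rest.takeWhile (· == '#')).length : Int)) (rest.dropWhile (· == '#')) := by
          rw [show pvRunsFrom 0 ('#' :: rest) = pvRunsFrom 1 rest from by simp [pvRunsFrom]]
          conv_lhs => rw [hsplit]
          rw [pvRunsFrom_replicate]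
        have hruns : pvHashRuns ('#' :: rest)
            = (((rest.takeWhile (· == '#')).length : Int) + 1) :: pvHashRuns (rest.dropWhile (· == '#')) := by
          simp [pvHashRuns]
        cases hre : rest.dropWhile (· == '#') with
        | nil =>
            rw [hre] at hrec hruns
            have hall : ∀ x ∈ rest, x = '#' := by
              intro x hx
              have h0 : rest.dropWhile (· == '#') = [] := hre
              rw [List.dropWhile_eq_nil_iff] at h0
              simpa using h0 x hx
            have hlast : pvLastHash ('#' :: rest) = true := by
              unfold pvLastHash
              rcases List.eq_nil_or_concat rest with h0 | ⟨t, a, rfl⟩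
              · subst h0; simp
              · have : a = '#' := hall a (by simp)
                subst this
                rw [pvGetLast?_cons (by simp)]
                simp
            rw [hrec, hruns, hlast]
            have h01 : (0:Int) < 1 + ((rest.takeWhile (· == '#')).length : Int) := by omega
            simp [pvRunsFrom, pvHashRuns, pvSplit, List.getLastD, h01]
            omega
        | cons c' t =>
            rw [hre] at hrec hruns
            have hc' : c' ≠ '#' := by
              have hh := List.head?_dropWhile_not (p := (· == '#')) (l := rest)
              rw [hre] at hh
              simpa using hh
            have hlast : pvLastHash ('#' :: rest) = pvLastHash (c' :: t) := by
              have hsp2 := List.takeWhile_append_dropWhile (p := (· == '#')) (l := rest)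
              rw [hre] at hsp2
              unfold pvLastHash
              conv_lhs => rw [← hsp2, ← List.cons_append]
              rw [pvGetLast?_append (by simp)]
            have h10 : (1 : Int) + ((rest.takeWhile (· == '#')).length : Int) ≠ 0 := by omega
            have hstep : pvRunsFrom (1 + ((rest.takeWhile (· == '#')).length : Int)) (c' :: t)
                = ((1 + ((rest.takeWhile (· == '#')).length : Int)) :: (pvRunsFrom 0 (c' :: t)).1,
                   (pvRunsFrom 0 (c' :: t)).2) := by
              rw [show pvRunsFrom 0 (c' :: t) = pvRunsFrom 0 t from by simp [pvRunsFrom, hc']]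
              simp [pvRunsFrom, hc', h10]
            have ih := pvRunsFrom_eq_split (c' :: t)
            rw [hrec, hstep, hruns, hlast, ih]
            by_cases hb : pvLastHash (c' :: t) = true
            · have hne : pvHashRuns (c' :: t) ≠ [] := pvHashRuns_ne_nil _ hb
              cases hhh : pvHashRuns (c' :: t) with
              | nil => exact absurd hhh hne
              | cons a b =>
                  simp [pvSplit, hb]
                  omega
            · have hb' : pvLastHash (c' :: t) = false := by simpa using hb
              simp [pvSplit, hb']
              omega
      · have ih := pvRunsFrom_eq_split rest
        have hlast : pvLastHash (c :: rest) = pvLastHash rest ∨ rest = [] := by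
          cases hre : rest with
          | nil => right; rfl
          | cons a b =>
              left
              unfold pvLastHash
              rw [← hre, pvGetLast?_cons (by simp [hre])]
        rcases hlast with hlast | hnil
        · rw [show pvRunsFrom 0 (c :: rest) = pvRunsFrom 0 rest from by simp [pvRunsFrom, hc],
              show pvHashRuns (c :: rest) = pvHashRuns rest from by simp [pvHashRuns, hc],
              hlast, ih]
        · subst hnil
          simp [pvRunsFrom, pvHashRuns, pvLastHash, pvSplit, hc]
  termination_by cs => cs.length
  decreasing_by
  · have h := List.length_dropWhile_le (p := (· == '#')) (l := rest)
    rw [hre] at h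
    simp only [List.length_cons] at h ⊢
    omega
  · simp

theorem pvEndswith_hash (s : String) :
    (PySem.Str.endswith s "#" = true) = (pvLastHash s.toList = true) := by
  unfold pvLastHash
  simp only [eq_iff_iff, beq_iff_eq]
  rw [show PySem.Str.endswith s "#" = PySem.Chars.endswith s.toList "#".toList from by
        simp [PySem.Str.endswith_eq]]
  rw [PySem.Chars.endswith_iff]
  constructor
  · rintro ⟨t, ht⟩
    have h1 : s.toList = t ++ ['#'] := by rw [← ht]; rfl
    rw [h1]
    simp
  · intro h
    have hne : s.toList ≠ [] := by rintro h0; rw [h0] at h; simp at h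
    refine ⟨(s.toList).dropLast, ?_⟩
    have := List.dropLast_append_getLast hne
    rw [List.getLast?_eq_getLast_of_ne_nil hne] at h
    simp only [Option.some.injEq] at h
    rw [show ("#".toList) = ['#'] from rfl, ← h]
    exact this

theorem pvEndswith_hash_bool (s : String) :
    PySem.Str.endswith s "#" = pvLastHash s.toList := by
  have h := pvEndswith_hash s
  cases h1 : PySem.Str.endswith s "#" <;> cases h2 : pvLastHash s.toList <;> simp_all

theorem pvAlt_eq_final (state : String) (red : List Int) :
    is_state_possible_alt state red
      = pvChk red (pvSplit (pvHashRuns state.toList) (PySem.Str.endswith state "#")) := by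
  simp only [is_state_possible_alt]
  unfold pvSplit
  by_cases hb : pvHashRuns state.toList ≠ [] ∧ PySem.Str.endswith state "#" = true
  · rw [if_pos hb]
    exact pvFinal_eq_chk _ _ _
  · rw [if_neg hb]
    exact pvFinal_eq_chk _ _ _


-- ===== VERDICT (by name: the statement is the Claim_ definition above) =====
theorem is_state_possible_spec : Claim_equal_is_state_possible := by
  intro state redundancy _
  unfold Spec_is_state_possible is_state_possible
  rw [pvLoopA_eq_chk, List.drop_zero, pvRunsFrom_eq_split, pvAlt_eq_final,
    pvEndswith_hash_bool]
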